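-- pv_equiv track=rewrite | github.com/asure-open-solutions/asure-flow | main.py | _tail_lines_within_chars
-- ===== SOURCE A (Python) =====
-- def _tail_lines_within_chars(lines: list[str], budget_chars: int) -> list[str]:
--     if budget_chars <= 0:
--         return []
--     out_rev: list[str] = []
--     used = 0
--     for line in reversed(lines):
--         line_len = len(line) + (1 if out_rev else 0)
--         if out_rev and used + line_len > budget_chars:
--             break
--         if (not out_rev) and len(line) > budget_chars:
--             keep = max(0, budget_chars - len(" ...[truncated]"))
--             out_rev.append((line[:keep] + " ...[truncated]").strip())
--             break
--         out_rev.append(line)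
--         used += line_len
--     return list(reversed(out_rev))
-- ===== SOURCE B (Python) =====
-- def _tail_lines_within_chars(lines: list[str], budget_chars: int) -> list[str]:
--     if budget_chars <= 0 or not lines:
--         return []
--     last = lines[-1]
--     if len(last) > budget_chars:
--         keep = max(0, budget_chars - len(" ...[truncated]"))
--         return [(last[:keep] + " ...[truncated]").strip()]
--     # costs[k-1] = total characters of the last k lines joined by 1-char separators
--     costs = []
--     total = -1
--     for line in reversed(lines):
--         total += len(line) + 1
--         costs.append(total)
--     k = sum(1 for c in costs if c <= budget_chars)
--     return lines[len(lines) - k:]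
-- ===== Notes on version B (the rewrite author's own statement) =====
-- stated objective: alternative
-- what changed: Replaces A's greedy back-to-front accumulate-with-break loop (and final re-reverse) by early guards, a precomputed suffix-cost table, a count of the suffixes that fit the budget, and a single tail slice of the original list.
import Mathlib
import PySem

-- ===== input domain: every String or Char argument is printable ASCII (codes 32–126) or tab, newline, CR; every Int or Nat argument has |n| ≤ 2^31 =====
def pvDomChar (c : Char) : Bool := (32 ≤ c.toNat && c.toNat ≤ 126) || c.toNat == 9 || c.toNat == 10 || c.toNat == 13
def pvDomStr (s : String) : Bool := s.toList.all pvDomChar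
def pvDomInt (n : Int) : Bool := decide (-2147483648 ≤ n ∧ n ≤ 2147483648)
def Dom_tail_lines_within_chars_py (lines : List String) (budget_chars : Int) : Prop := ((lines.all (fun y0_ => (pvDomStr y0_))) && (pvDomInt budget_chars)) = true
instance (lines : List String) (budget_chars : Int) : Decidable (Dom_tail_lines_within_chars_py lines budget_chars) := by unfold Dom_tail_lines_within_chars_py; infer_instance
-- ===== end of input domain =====

-- B replaces A's greedy back-to-front accumulation loop (break + re-reverse) by a precomputed
-- suffix-cost table, a count of the fitting suffixes, and a single tail slice (objective: alternative).

-- ===== PORT A =====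
-- the 'for line in reversed(lines)' loop of A, with out_rev (appended at the end) and used as state
def pvALoop (budget : Int) : List String → List String → Int → List String
  | [], out_rev, _ => out_rev
  | line :: rest, out_rev, used =>
    let line_len : Int := (PySem.Str.len line : Int) + (if out_rev.isEmpty then 0 else 1)
    if !out_rev.isEmpty && decide (used + line_len > budget) then out_rev
    else if out_rev.isEmpty && decide ((PySem.Str.len line : Int) > budget) then
      let keep : Int := max 0 (budget - (PySem.Str.len " ...[truncated]" : Int))
      out_rev ++ [PySem.Str.strip (PySem.Str.slice line none (some keep) ++ " ...[truncated]")]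
    else pvALoop budget rest (out_rev ++ [line]) (used + line_len)

def tail_lines_within_chars_py (lines : List String) (budget_chars : Int) : List String :=
  if budget_chars ≤ 0 then []
  else (pvALoop budget_chars lines.reverse [] 0).reverse

-- ===== PORT B =====
-- costs table of Source B: cost of keeping the last k lines, built over reversed(lines), total from -1
def pvCosts : List String → Int → List Int
  | [], _ => []
  | line :: rest, total =>
    let t := total + (PySem.Str.len line : Int) + 1
    t :: pvCosts rest t

def tail_lines_within_chars_py_alt (lines : List String) (budget_chars : Int) : List String :=
  if budget_chars ≤ 0 ∨ lines = [] then []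
  else
    let last := (PySem.List.pyGet? lines (-1)).getD ""   -- lines[-1]; lines ≠ [] here
    if (PySem.Str.len last : Int) > budget_chars then
      let keep : Int := max 0 (budget_chars - (PySem.Str.len " ...[truncated]" : Int))
      [PySem.Str.strip (PySem.Str.slice last none (some keep) ++ " ...[truncated]")]
    else
      let costs := pvCosts lines.reverse (-1)
      let k : Nat := costs.countP (fun c => decide (c ≤ budget_chars))
      PySem.List.slice lines (some ((lines.length : Int) - (k : Int))) none

-- ===== PRECONDITION & SPEC =====
def Spec_tail_lines_within_chars_py (lines : List String) (budget_chars : Int) (out : List String) : Prop := out = tail_lines_within_chars_py_alt lines budget_chars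
instance (lines : List String) (budget_chars : Int) (out : List String) : Decidable (Spec_tail_lines_within_chars_py lines budget_chars out) := by unfold Spec_tail_lines_within_chars_py; infer_instance

-- ===== CLAIM (what is proved, stated in full; the proofs are below) =====
def Claim_equal_tail_lines_within_chars_py : Prop := ∀ (lines : List String) (budget_chars : Int), Dom_tail_lines_within_chars_py lines budget_chars → Spec_tail_lines_within_chars_py lines budget_chars (tail_lines_within_chars_py lines budget_chars)

-- ===== LEMMAS AND PROOFS =====

-- the lines A's loop takes after the first one, in reversed order, from used count u
def pvTaken (B : Int) : List String → Int → List String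
  | [], _ => []
  | l :: r, u =>
    if u + (l.length : Int) + 1 > B then []
    else l :: pvTaken B r (u + (l.length : Int) + 1)

theorem pvALoop_cons_nonempty (B : Int) (l : String) (rest out_rev : List String) (u : Int)
    (h : out_rev ≠ []) :
    pvALoop B (l :: rest) out_rev u =
      if u + (l.length : Int) + 1 > B then out_rev
      else pvALoop B rest (out_rev ++ [l]) (u + ((l.length : Int) + 1)) := by
  have hne : out_rev.isEmpty = false := by simpa [List.isEmpty_iff] using h
  rw [pvALoop]
  simp only [hne, Bool.not_false, Bool.true_and, Bool.false_and, if_false,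
    PySem.Str.len_eq, String.length_toList, decide_eq_true_eq, Bool.false_eq_true]
  split_ifs with h1 h2 <;> first | rfl | omega

theorem pvALoop_nonempty (B : Int) (r : List String) (out_rev : List String) (u : Int)
    (h : out_rev ≠ []) : pvALoop B r out_rev u = out_rev ++ pvTaken B r u := by
  induction r generalizing out_rev u with
  | nil => simp [pvALoop, pvTaken]
  | cons l rest ih =>
    rw [pvALoop_cons_nonempty B l rest out_rev u h, pvTaken]
    by_cases hc : u + (l.length : Int) + 1 > B
    · rw [if_pos hc, if_pos hc]
      simp
    · rw [if_neg hc, if_neg hc]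
      rw [ih _ _ (by simp)]
      rw [List.append_assoc, List.singleton_append]
      ring_nf

theorem pvCosts_gt (r : List String) (u c : Int) (h : c ∈ pvCosts r u) : u < c := by
  induction r generalizing u with
  | nil => simp [pvCosts] at h
  | cons l rest ih =>
    simp only [pvCosts, List.mem_cons, PySem.Str.len_eq, String.length_toList] at h
    rcases h with rfl | h
    · omega
    · have := ih _ h
      omega

theorem pvCosts_count (B : Int) (r : List String) (u : Int) :
    (pvCosts r u).countP (fun c => decide (c ≤ B)) = (pvTaken B r u).length := by
  induction r generalizing u with
  | nil => simp [pvCosts, pvTaken]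
  | cons l rest ih =>
    rw [pvCosts, pvTaken]
    simp only [List.countP_cons, decide_eq_true_eq, PySem.Str.len_eq, String.length_toList]
    by_cases hc : u + (l.length : Int) + 1 ≤ B
    · rw [if_pos hc, if_neg (show ¬(u + (l.length : Int) + 1 > B) by omega)]
      simp only [List.length_cons]
      rw [ih]
    · rw [if_neg hc, if_pos (show u + (l.length : Int) + 1 > B by omega)]
      simp only [List.length_nil, Nat.add_zero]
      rw [List.countP_eq_zero.2]
      intro c hcmem
      have := pvCosts_gt rest _ c hcmem
      simp only [decide_eq_true_eq]
      omega

theorem pvTaken_prefix (B : Int) (r : List String) (u : Int) :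
    pvTaken B r u = r.take (pvTaken B r u).length := by
  induction r generalizing u with
  | nil => simp [pvTaken]
  | cons l rest ih =>
    rw [pvTaken]
    by_cases hc : u + (l.length : Int) + 1 > B
    · rw [if_pos hc]
      simp
    · rw [if_neg hc]
      simp only [List.length_cons, List.take_succ_cons]
      rw [← ih]

theorem pvTaken_length_le (B : Int) (r : List String) (u : Int) :
    (pvTaken B r u).length ≤ r.length := by
  induction r generalizing u with
  | nil => simp [pvTaken]
  | cons l rest ih =>
    rw [pvTaken]
    by_cases hc : u + (l.length : Int) + 1 > B
    · rw [if_pos hc]; simp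
    · rw [if_neg hc]
      simp only [List.length_cons]
      exact Nat.succ_le_succ (ih _)

theorem pvGet_neg_one (ys : List String) (a : String) :
    PySem.List.pyGet? (ys ++ [a]) (-1) = some a := by
  simp [pysem]

-- ===== VERDICT (by name: the statement is the Claim_ definition above) =====
theorem tail_lines_within_chars_py_spec : Claim_equal_tail_lines_within_chars_py := by
  intro lines B _
  unfold Spec_tail_lines_within_chars_py tail_lines_within_chars_py tail_lines_within_chars_py_alt
  by_cases hB : B ≤ 0
  · simp [hB]
  · rcases hrev : lines.reverse with _ | ⟨l0, rrest⟩
    · have : lines = [] := by simpa using congrArg List.reverse hrev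
      subst this
      simp [pvALoop, hB]
    · have hlines : lines = rrest.reverse ++ [l0] := by
        have := congrArg List.reverse hrev
        simpa using this
      have hne : lines ≠ [] := by simp [hlines]
      rw [if_neg hB, if_neg (by simp [hB, hne])]
      rw [hlines, pvGet_neg_one]
      simp only [Option.getD_some]
      by_cases hlong : (l0.length : Int) > B
      · rw [if_pos (by simp only [PySem.Str.len_eq, String.length_toList]; omega), pvALoop]
        simp only [List.isEmpty_nil]
        rw [if_neg (by simp), if_pos (by simp only [Bool.true_and, decide_eq_true_eq, PySem.Str.len_eq, String.length_toList]; omega)]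
        simp
      · rw [if_neg (by simp only [PySem.Str.len_eq, String.length_toList]; omega), pvALoop]
        simp only [List.isEmpty_nil]
        rw [if_neg (by simp), if_neg (by simp only [Bool.true_and, decide_eq_true_eq, PySem.Str.len_eq, String.length_toList]; omega)]
        rw [pvALoop_nonempty _ _ _ _ (by simp)]
        rw [pvCosts]
        simp only [List.countP_cons, decide_eq_true_eq, PySem.Str.len_eq, String.length_toList,
          if_true, add_zero, zero_add, List.nil_append]
        have harg1 : (-1 : Int) + (l0.length : Int) + 1 = (l0.length : Int) := by ring
        rw [harg1, if_pos (by omega)]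
        rw [pvCosts_count B rrest (l0.length : Int)]
        set m := (pvTaken B rrest (l0.length : Int)).length with hm
        have hmle : m ≤ rrest.length := pvTaken_length_le _ _ _
        have hnn : (0 : Int) ≤ ((rrest.reverse ++ [l0]).length : Int) - ((m + 1 : Nat) : Int) := by
          simp
          omega
        rw [PySem.List.slice_from _ hnn]
        have htn : (((rrest.reverse ++ [l0]).length : Int) - ((m + 1 : Nat) : Int)).toNat
            = rrest.length - m := by
          simp
        rw [htn, List.drop_append_of_le_length (by simp)]
        rw [List.reverse_append, List.reverse_cons, List.reverse_nil, List.nil_append]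
        congr 1
        conv_lhs => rw [pvTaken_prefix B rrest (l0.length : Int), ← hm]
        rw [List.reverse_take]
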